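-- pv_equiv track=rewrite | github.com/creaciond/coreference | markup/assemble_corpus_morph.py | nice_ids
-- ===== SOURCE A (Python) =====
-- def nice_ids(chains):
--     """
--     Turns long and unreadable chain and mention IDs from RDF files into short
--     and readable ones :)
--
--     Args:
--         chains (dict): dict with information on chains and mentions
--             {chain_id (str): [mentions (tuples)]}
--     Additional:
--         mention (tuple): mention data, includes:
--             - mention_start (int),
--             - mention_end (int),
--             - mention_id (str)
--     Returns:
--         ready_chains (dict): same info as in chains, but with human-readable IDs
--     """
--     ready_chains = {}
--     prefix_chain = "ch_"
--     prefix_mention = "m_"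
--     count_ch = 0
--     count_men = 0
--     normal_mention_names = {}
--     for chain in chains:
--         nice_chain = prefix_chain + "{:06}".format(count_ch)
--         count_ch += 1
--
--         ready_chains[nice_chain] = []
--         for mention in chains[chain]:
--             if mention[2] not in normal_mention_names:
--                 normal_mention_names[mention[2]] = prefix_mention + "{:06}".format(count_men)
--                 count_men += 1
--             new_mention = (mention[0], mention[1],
--                            normal_mention_names[mention[2]])
--
--             ready_chains[nice_chain].append(new_mention)
--
--     return ready_chains
-- ===== SOURCE B (Python) =====
-- def nice_ids(chains):
--     # Two passes: first build the mention-id mapping in first-appearance order,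
--     # then relabel every chain by a simple enumerate + lookup.
--     names = {}
--     n = 0
--     for mentions in chains.values():
--         for m in mentions:
--             if m[2] not in names:
--                 names[m[2]] = "m_" + "{:06}".format(n)
--                 n += 1
--     out = {}
--     for i, mentions in enumerate(chains.values()):
--         out["ch_" + "{:06}".format(i)] = [(m[0], m[1], names[m[2]]) for m in mentions]
--     return out
-- ===== Notes on version B (the rewrite author's own statement) =====
-- stated objective: alternative
-- what changed: Single interleaved pass carrying four pieces of mutable state is replaced by two separate passes: one that only builds the mention-id mapping in first-appearance order, then an enumerate-based relabelling pass that merely looks the mapping up.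
import Mathlib
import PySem

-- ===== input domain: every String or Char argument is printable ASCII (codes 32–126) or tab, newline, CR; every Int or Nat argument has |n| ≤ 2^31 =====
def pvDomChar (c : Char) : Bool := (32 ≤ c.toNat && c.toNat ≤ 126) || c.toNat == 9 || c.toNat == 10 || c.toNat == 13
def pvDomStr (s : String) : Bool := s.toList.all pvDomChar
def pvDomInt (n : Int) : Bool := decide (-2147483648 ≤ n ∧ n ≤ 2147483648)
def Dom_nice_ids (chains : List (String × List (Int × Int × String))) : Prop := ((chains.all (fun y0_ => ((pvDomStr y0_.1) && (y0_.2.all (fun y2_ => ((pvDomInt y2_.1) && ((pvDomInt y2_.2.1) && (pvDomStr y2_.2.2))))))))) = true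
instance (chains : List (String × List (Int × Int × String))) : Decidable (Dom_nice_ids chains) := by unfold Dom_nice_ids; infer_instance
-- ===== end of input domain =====

-- B replaces A's single interleaved pass (four pieces of mutable state) by two separate passes:
-- build the mention-id mapping first, then relabel chains via enumerate + lookup (alternative decomposition, same cost).


-- "{:06}".format(n); exact for n ≥ 0, the only values the counters ever take
def fmt06 (n : Int) : String :=
  String.ofList (List.replicate (6 - (PySem.Int.toChars n).length) '0' ++ PySem.Int.toChars n)

-- ===== PORT A =====
-- A's inner loop over one chain's mentions: state = (mention list built so far, normal_mention_names, count_men)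
def aInner (ms : List (Int × Int × String))
    (st : List (Int × Int × String) × PySem.Dict String String × Int) :
    List (Int × Int × String) × PySem.Dict String String × Int :=
  ms.foldl
    (fun st m =>
      if st.2.1.contains m.2.2 then
        (st.1 ++ [(m.1, m.2.1, (st.2.1.get? m.2.2).getD "")], st.2.1, st.2.2)
      else
        let names := st.2.1.insert m.2.2 ("m_" ++ fmt06 st.2.2)
        -- lookup of a key just inserted / present: .getD "" is unreachable-default, never a KeyError here
        (st.1 ++ [(m.1, m.2.1, (names.get? m.2.2).getD "")], names, st.2.2 + 1))
    st

-- A: one pass over the chain keys, state = (ready_chains, count_ch, (normal_mention_names, count_men))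
def nice_ids (chains : List (String × List (Int × Int × String))) : List (String × List (Int × Int × String)) :=
  (chains.foldl
    (fun st kv =>
      let r := aInner (((PySem.Dict.mk chains).get? kv.1).getD []) ([], st.2.2)
      (st.1 ++ [("ch_" ++ fmt06 st.2.1, r.1)], st.2.1 + 1, r.2))
    ([], 0, PySem.Dict.empty, 0)).1

-- ===== PORT B =====
-- B's first pass: extend (names, counter) with one chain's mentions
def pass1 (s : PySem.Dict String String × Int) (ms : List (Int × Int × String)) :
    PySem.Dict String String × Int :=
  ms.foldl
    (fun s m =>
      if s.1.contains m.2.2 then s else (s.1.insert m.2.2 ("m_" ++ fmt06 s.2), s.2 + 1))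
    s

def nice_ids_alt (chains : List (String × List (Int × Int × String))) : List (String × List (Int × Int × String)) :=
  let vals := PySem.Dict.values (PySem.Dict.mk chains)
  let names := (vals.foldl pass1 (PySem.Dict.empty, 0)).1
  (PySem.List.enumerate vals 0).map
    (fun p => ("ch_" ++ fmt06 p.1, p.2.map (fun m => (m.1, m.2.1, (names.get? m.2.2).getD ""))))

-- ===== PRECONDITION & SPEC =====
-- Pre_ excludes association lists with duplicate chain keys, which a Python dict argument cannot represent.
def Pre_nice_ids (chains : List (String × List (Int × Int × String))) : Prop :=
  (chains.map Prod.fst).Nodup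
instance (chains : List (String × List (Int × Int × String))) : Decidable (Pre_nice_ids chains) := by
  unfold Pre_nice_ids; infer_instance

def pvWitness_nice_ids : (List (String × List (Int × Int × String))) :=
  [("chainA", [(0, 1, "mX"), (2, 3, "mY")]), ("chainB", [(4, 5, "mX")]), ("chainC", [])]

def Spec_nice_ids (chains : List (String × List (Int × Int × String))) (out : List (String × List (Int × Int × String))) : Prop := out = nice_ids_alt chains
instance (chains : List (String × List (Int × Int × String))) (out : List (String × List (Int × Int × String))) : Decidable (Spec_nice_ids chains out) := by unfold Spec_nice_ids; infer_instance

-- ===== CLAIM (what is proved, stated in full; the proofs are below) =====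
def Claim_equal_nice_ids : Prop := ∀ (chains : List (String × List (Int × Int × String))), Dom_nice_ids chains → Pre_nice_ids chains → Spec_nice_ids chains (nice_ids chains)

-- ===== LEMMAS AND PROOFS =====

-- pass1 only extends the mapping: an existing binding survives one chain
lemma pass1_ext (s : PySem.Dict String String × Int) (ms : List (Int × Int × String))
    (k v : String) (h : s.1.get? k = some v) : (pass1 s ms).1.get? k = some v := by
  induction ms generalizing s with
  | nil => simpa [pass1] using h
  | cons m rest ih =>
    have hstep : pass1 s (m :: rest) =
        pass1 (if s.1.contains m.2.2 then s else
               (s.1.insert m.2.2 ("m_" ++ fmt06 s.2), s.2 + 1)) rest := by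
      by_cases hc : s.1.contains m.2.2 <;> simp [pass1, hc]
    rw [hstep]
    by_cases hc : s.1.contains m.2.2
    · simpa [hc] using ih s h
    · have hne : k ≠ m.2.2 := by
        intro e; subst e
        rw [PySem.Dict.contains_eq_isSome_get?, h] at hc
        simp at hc
      simp only [hc, if_false, Bool.false_eq_true]
      exact ih _ (by simpa [PySem.Dict.get?_insert_of_ne _ _ hne] using h)

-- … and survives the whole first pass
lemma pass1_fold_ext (vss : List (List (Int × Int × String))) (s : PySem.Dict String String × Int)
    (k v : String) (h : s.1.get? k = some v) : (vss.foldl pass1 s).1.get? k = some v := by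
  induction vss generalizing s with
  | nil => simpa using h
  | cons ms rest ih => simpa using ih (pass1 s ms) (pass1_ext s ms k v h)

-- A's inner loop, run from the same (names, counter) state as B's first pass, appends exactly
-- the relabelling of ms under any final map N extending pass1 s ms, and leaves B's pass1 state.
lemma aInner_eq (ms : List (Int × Int × String)) (acc : List (Int × Int × String))
    (s : PySem.Dict String String × Int) (N : PySem.Dict String String)
    (hN : ∀ k v, (pass1 s ms).1.get? k = some v → N.get? k = some v) :
    aInner ms (acc, s) =
      (acc ++ ms.map (fun m => (m.1, m.2.1, (N.get? m.2.2).getD "")), pass1 s ms) := by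
  induction ms generalizing acc s with
  | nil => simp [aInner, pass1]
  | cons m rest ih =>
    by_cases hc : s.1.contains m.2.2
    · obtain ⟨v0, hv0⟩ : ∃ v0, s.1.get? m.2.2 = some v0 := by
        rw [PySem.Dict.contains_eq_isSome_get?] at hc
        exact Option.isSome_iff_exists.mp hc
      have hstep : pass1 s (m :: rest) = pass1 s rest := by simp [pass1, hc]
      have hNm : N.get? m.2.2 = some v0 := hN _ _ (by rw [hstep]; exact pass1_ext s rest _ _ hv0)
      have hrest : ∀ k v, (pass1 s rest).1.get? k = some v → N.get? k = some v := by
        rw [← hstep]; exact hN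
      simp only [aInner, List.foldl_cons, hc, if_true] at *
      rw [ih (acc ++ [(m.1, m.2.1, (s.1.get? m.2.2).getD "")]) s hrest]
      simp [hv0, hNm, hstep]
    · have hstep : pass1 s (m :: rest) =
          pass1 (s.1.insert m.2.2 ("m_" ++ fmt06 s.2), s.2 + 1) rest := by
        simp [pass1, hc]
      have hself : (s.1.insert m.2.2 ("m_" ++ fmt06 s.2)).get? m.2.2 = some ("m_" ++ fmt06 s.2) :=
        PySem.Dict.get?_insert_self ..
      have hNm : N.get? m.2.2 = some ("m_" ++ fmt06 s.2) :=
        hN _ _ (by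
          rw [hstep]
          exact pass1_ext (s.1.insert m.2.2 ("m_" ++ fmt06 s.2), s.2 + 1) rest _ _ hself)
      have hrest : ∀ k v,
          (pass1 (s.1.insert m.2.2 ("m_" ++ fmt06 s.2), s.2 + 1) rest).1.get? k = some v →
          N.get? k = some v := by
        rw [← hstep]; exact hN
      simp only [aInner, List.foldl_cons, hc, if_false, Bool.false_eq_true] at *
      rw [ih (acc ++ [(m.1, m.2.1, ((s.1.insert m.2.2 ("m_" ++ fmt06 s.2)).get? m.2.2).getD "")])
            (s.1.insert m.2.2 ("m_" ++ fmt06 s.2), s.2 + 1) hrest]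
      simp [hself, hNm, hstep]

-- A's outer loop (with each chain's mention list already in hand) is B's enumerate-map,
-- threaded through B's first-pass state.
lemma foldA_eq (ps : List (String × List (Int × Int × String)))
    (ready : List (String × List (Int × Int × String))) (cch : Int)
    (s : PySem.Dict String String × Int) (N : PySem.Dict String String)
    (hN : ∀ k v, ((ps.map Prod.snd).foldl pass1 s).1.get? k = some v → N.get? k = some v) :
    ps.foldl
      (fun st kv =>
        (st.1 ++ [("ch_" ++ fmt06 st.2.1, (aInner kv.2 ([], st.2.2)).1)], st.2.1 + 1,
         (aInner kv.2 ([], st.2.2)).2))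
      (ready, cch, s)
    = (ready ++ (PySem.List.enumerate (ps.map Prod.snd) cch).map
        (fun p => ("ch_" ++ fmt06 p.1, p.2.map (fun m => (m.1, m.2.1, (N.get? m.2.2).getD "")))),
       cch + ps.length, (ps.map Prod.snd).foldl pass1 s) := by
  induction ps generalizing ready cch s with
  | nil => simp
  | cons kv rest ih =>
    have hmaps : ((kv :: rest).map Prod.snd).foldl pass1 s = (rest.map Prod.snd).foldl pass1 (pass1 s kv.2) := by
      simp
    have hN1 : ∀ k v, (pass1 s kv.2).1.get? k = some v → N.get? k = some v := by
      intro k v h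
      exact hN k v (by rw [hmaps]; exact pass1_fold_ext _ _ _ _ h)
    have hNr : ∀ k v, ((rest.map Prod.snd).foldl pass1 (pass1 s kv.2)).1.get? k = some v → N.get? k = some v := by
      rw [← hmaps]; exact hN
    simp only [List.foldl_cons]
    rw [aInner_eq kv.2 [] s N hN1]
    simp only [List.nil_append]
    rw [ih (ready ++ [("ch_" ++ fmt06 cch, kv.2.map (fun m => (m.1, m.2.1, (N.get? m.2.2).getD "")))]) (cch + 1) (pass1 s kv.2) hNr]
    rw [hmaps]
    simp only [PySem.List.enumerate_cons, List.map_cons, List.length_cons, List.append_assoc,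
      List.cons_append, List.nil_append, Prod.mk.injEq]
    refine ⟨trivial, ?_, trivial⟩
    push_cast; ring

-- under Pre_, A's dict lookup of a chain key returns that pair's own mention list
lemma lookup_self (chains : List (String × List (Int × Int × String)))
    (hpre : Pre_nice_ids chains) (kv : String × List (Int × Int × String)) (hmem : kv ∈ chains) :
    ((PySem.Dict.mk chains).get? kv.1).getD [] = kv.2 := by
  have hkeys : (PySem.Dict.mk chains).keys.Nodup := by
    simpa [PySem.Dict.keys] using hpre
  have : (PySem.Dict.mk chains).get? kv.1 = some kv.2 :=
    PySem.Dict.get?_of_mem_items (PySem.Dict.mk chains) (by simpa using hmem) hkeys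
  simp [this]

-- ===== VERDICT (by name: the statement is the Claim_ definition above) =====
theorem nice_ids_spec : Claim_equal_nice_ids := by
  intro chains _ hpre
  unfold Spec_nice_ids
  have h1 : nice_ids chains =
      (chains.foldl
        (fun st kv =>
          (st.1 ++ [("ch_" ++ fmt06 st.2.1, (aInner kv.2 ([], st.2.2)).1)], st.2.1 + 1,
           (aInner kv.2 ([], st.2.2)).2))
        ([], 0, PySem.Dict.empty, 0)).1 := by
    unfold nice_ids
    congr 1
    apply PySem.List.foldl_congr_mem
    intro acc kv hmem
    simp [lookup_self chains hpre kv hmem]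
  rw [h1, foldA_eq chains [] 0 (PySem.Dict.empty, 0)
        ((chains.map Prod.snd).foldl pass1 (PySem.Dict.empty, 0)).1 (fun _ _ h => h)]
  unfold nice_ids_alt
  simp [PySem.Dict.values]
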